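-- pv_equiv track=rewrite | github.com/RondaSMR/Practice_2_Config | stage5.py | generate_ascii_tree
-- ===== SOURCE A (Python) =====
-- from typing import Dict, List, Any
--
-- def generate_ascii_tree(graph: Dict[str, List[str]], start_node: str) -> List[str]:
--     result = []
--
--     def build_ascii_tree(node: str, prefix: str = "", is_last: bool = True) -> None:
--         connector = "└── " if is_last else "├── "
--         result.append(prefix + connector + node)
--
--         if node in graph:
--             dependencies = graph[node]
--             new_prefix = prefix + ("    " if is_last else "│   ")
--
--             for i, dep in enumerate(dependencies):
--                 is_last_dep = i == len(dependencies) - 1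
--                 build_ascii_tree(dep, new_prefix, is_last_dep)
--
--     build_ascii_tree(start_node)
--     return result
-- ===== SOURCE B (Python) =====
-- def generate_ascii_tree(graph, start_node):
--     result = []
--     stack = [(start_node, "", True)]
--     while stack:
--         node, prefix, is_last = stack.pop()
--         result.append(prefix + ("└── " if is_last else "├── ") + node)
--         if node in graph:
--             dependencies = graph[node]
--             new_prefix = prefix + ("    " if is_last else "│   ")
--             for i, dep in reversed(list(enumerate(dependencies))):
--                 stack.append((dep, new_prefix, i == len(dependencies) - 1))
--     return result
-- ===== Notes on version B (the rewrite author's own statement) =====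
-- stated objective: alternative
-- what changed: The recursive DFS with a nested helper closure is replaced by an iterative DFS over an explicit stack of (node, prefix, is_last) tuples, pushing children in reverse so LIFO popping preserves the output order.
import Mathlib
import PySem

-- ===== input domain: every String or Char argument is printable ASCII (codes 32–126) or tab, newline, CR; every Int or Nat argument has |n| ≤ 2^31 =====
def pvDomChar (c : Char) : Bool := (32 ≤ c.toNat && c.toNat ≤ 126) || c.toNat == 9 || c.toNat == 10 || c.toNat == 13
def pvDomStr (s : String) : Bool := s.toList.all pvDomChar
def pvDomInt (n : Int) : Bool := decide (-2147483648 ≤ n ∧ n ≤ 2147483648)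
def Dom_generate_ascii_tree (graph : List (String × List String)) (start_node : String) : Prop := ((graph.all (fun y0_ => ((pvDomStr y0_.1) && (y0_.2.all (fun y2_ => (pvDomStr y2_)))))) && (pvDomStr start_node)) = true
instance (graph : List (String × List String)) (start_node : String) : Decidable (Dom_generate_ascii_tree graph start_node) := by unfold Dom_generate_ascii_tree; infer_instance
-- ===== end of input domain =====

-- B replaces A's recursive nested-closure DFS by an iterative DFS over an explicit stack of
-- (node, prefix, is_last) entries (alternative decomposition, same cost); A = B on every input
-- where A terminates (Pre_: no dependency chain of length graph.length+1 from start_node).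


-- ===== PORT A =====
-- A's recursion has no structural termination measure (it diverges on cyclic graphs, where the
-- Python raises RecursionError), so the port carries a fuel argument as a pure totality guard;
-- fuel graph.length + 1 can only run out on inputs excluded by Pre_ below.
def buildAsciiTree (graph : List (String × List String)) : Nat → String → String → Bool → List String
  | 0, _, _, _ => []
  | fuel+1, node, pref, isLast =>
    let connector := if isLast then "└── " else "├── "
    let result := [pref ++ connector ++ node]
    match (PySem.Dict.ofList graph).get? node with
    | none => result
    | some dependencies =>
      let newPrefix := pref ++ (if isLast then "    " else "│   ")
      (PySem.List.enumerate dependencies).foldl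
        (fun acc p => acc ++ buildAsciiTree graph fuel p.2 newPrefix (p.1 == (dependencies.length : Int) - 1))
        result

def generate_ascii_tree (graph : List (String × List String)) (start_node : String) : List String :=
  buildAsciiTree graph (graph.length + 1) start_node "" true

-- ===== PORT B =====
-- Stack modelled head-as-top: Python pushes the REVERSED enumeration onto an end-top list, which
-- is exactly prepending the enumeration in order onto a head-top list. The fuel argument is a
-- pure totality guard (Python's `while stack` loop has none); it cannot run out under Pre_.
def loopAsciiTree (graph : List (String × List String)) :
    Nat → List (String × String × Bool) → List String → List String
  | 0, _, result => result
  | _+1, [], result => result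
  | fuel+1, (node, pref, isLast) :: rest, result =>
    let result := result ++ [pref ++ (if isLast then "└── " else "├── ") ++ node]
    match (PySem.Dict.ofList graph).get? node with
    | none => loopAsciiTree graph fuel rest result
    | some dependencies =>
      let newPrefix := pref ++ (if isLast then "    " else "│   ")
      loopAsciiTree graph fuel
        ((PySem.List.enumerate dependencies).map
          (fun p => (p.2, newPrefix, p.1 == (dependencies.length : Int) - 1)) ++ rest)
        result

def pvFuelB (graph : List (String × List String)) : Nat :=
  ((PySem.Dict.ofList graph).items.foldl (fun a p => a + p.2.length) 0 + 2) ^ (graph.length + 1)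

def generate_ascii_tree_alt (graph : List (String × List String)) (start_node : String) : List String :=
  loopAsciiTree graph (pvFuelB graph) [(start_node, "", true)] []

-- ===== PRECONDITION & SPEC =====
def pvStep (graph : List (String × List String)) (S : List String) : List String :=
  S.flatMap (fun n => ((PySem.Dict.ofList graph).get? n).getD [])

-- Pre_ excludes exactly the inputs on which A never returns (RecursionError): a graph is admitted
-- iff every dependency chain from start_node is finite, i.e. (the graph having graph.length keys
-- at most) there is no chain of graph.length + 1 edges from start_node.
def Pre_generate_ascii_tree (graph : List (String × List String)) (start_node : String) : Prop :=
  (pvStep graph)^[graph.length + 1] [start_node] = []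
instance (graph : List (String × List String)) (start_node : String) : Decidable (Pre_generate_ascii_tree graph start_node) := by unfold Pre_generate_ascii_tree; infer_instance

def pvWitness_generate_ascii_tree : (List (String × List String)) × String :=
  ([("a", ["b", "c"]), ("b", [])], "a")

def Spec_generate_ascii_tree (graph : List (String × List String)) (start_node : String) (out : List String) : Prop := out = generate_ascii_tree_alt graph start_node
instance (graph : List (String × List String)) (start_node : String) (out : List String) : Decidable (Spec_generate_ascii_tree graph start_node out) := by unfold Spec_generate_ascii_tree; infer_instance

-- ===== CLAIM (what is proved, stated in full; the proofs are below) =====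
def Claim_equal_generate_ascii_tree : Prop := ∀ (graph : List (String × List String)) (start_node : String), Dom_generate_ascii_tree graph start_node → Pre_generate_ascii_tree graph start_node → Spec_generate_ascii_tree graph start_node (generate_ascii_tree graph start_node)

-- ===== LEMMAS AND PROOFS =====

-- fuel f suffices for the recursion of A below node
def pvComplete (graph : List (String × List String)) : Nat → String → Prop
  | 0, _ => False
  | f+1, node => ∀ dependencies, (PySem.Dict.ofList graph).get? node = some dependencies →
      ∀ d ∈ dependencies, pvComplete graph f d

lemma pvComplete_mono (graph : List (String × List String)) :
    ∀ f node, pvComplete graph f node → pvComplete graph (f+1) node := by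
  intro f
  induction f with
  | zero => intro node h; exact h.elim
  | succ f ih =>
    intro node h deps hdeps d hd
    exact ih d (h deps hdeps d hd)

lemma pvStep_subset (graph : List (String × List String)) {S T : List String} (h : S ⊆ T) :
    pvStep graph S ⊆ pvStep graph T := by
  intro x hx
  simp only [pvStep, List.mem_flatMap] at hx ⊢
  obtain ⟨n, hn, hx⟩ := hx
  exact ⟨n, h hn, hx⟩

lemma pvStep_iter_nil (graph : List (String × List String)) :
    ∀ f {S T : List String}, S ⊆ T → (pvStep graph)^[f] T = [] → (pvStep graph)^[f] S = [] := by
  intro f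
  induction f with
  | zero => intro S T h hT; subst hT; exact List.subset_nil.mp h
  | succ f ih =>
    intro S T h hT
    rw [Function.iterate_succ_apply] at hT ⊢
    exact ih (pvStep_subset graph h) hT

lemma pre_complete (graph : List (String × List String)) :
    ∀ f node, (pvStep graph)^[f] [node] = [] → pvComplete graph f node := by
  intro f
  induction f with
  | zero => intro node h; simp at h
  | succ f ih =>
    intro node h deps hdeps d hd
    rw [Function.iterate_succ_apply] at h
    have hstep : pvStep graph [node] = deps := by
      simp [pvStep, hdeps]
    rw [hstep] at h
    exact ih d (pvStep_iter_nil graph f (by simpa using hd) h)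

lemma snd_mem_of_mem_enumerate {α : Type} {xs : List α} {p : Int × α}
    (h : p ∈ PySem.List.enumerate xs) : p.2 ∈ xs := by
  rw [PySem.List.mem_enumerate_iff] at h
  obtain ⟨k, hk, rfl⟩ := h
  exact List.getElem_mem hk

lemma buildAsciiTree_none (graph : List (String × List String)) (f : Nat)
    (node pref : String) (isLast : Bool)
    (hg : (PySem.Dict.ofList graph).get? node = none) :
    buildAsciiTree graph (f+1) node pref isLast =
      [pref ++ (if isLast then "└── " else "├── ") ++ node] := by
  simp only [buildAsciiTree, hg]

lemma buildAsciiTree_some (graph : List (String × List String)) (f : Nat)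
    (node pref : String) (isLast : Bool) {deps : List String}
    (hg : (PySem.Dict.ofList graph).get? node = some deps) :
    buildAsciiTree graph (f+1) node pref isLast =
      (pref ++ (if isLast then "└── " else "├── ") ++ node) ::
        (PySem.List.enumerate deps).flatMap
          (fun p => buildAsciiTree graph f p.2 (pref ++ (if isLast then "    " else "│   "))
            (p.1 == (deps.length : Int) - 1)) := by
  conv_lhs => simp only [buildAsciiTree, hg]
  rw [PySem.List.foldl_append_eq_flatMap]
  rfl

lemma buildAsciiTree_stable (graph : List (String × List String)) :
    ∀ f node pref isLast, pvComplete graph f node →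
      buildAsciiTree graph (f+1) node pref isLast = buildAsciiTree graph f node pref isLast := by
  intro f
  induction f with
  | zero => intro node pref isLast h; exact h.elim
  | succ f ih =>
    intro node pref isLast h
    cases hg : (PySem.Dict.ofList graph).get? node with
    | none => rw [buildAsciiTree_none graph (f+1) node pref isLast hg,
                  buildAsciiTree_none graph f node pref isLast hg]
    | some deps =>
      rw [buildAsciiTree_some graph (f+1) node pref isLast hg,
          buildAsciiTree_some graph f node pref isLast hg]
      exact congrArg _ (List.flatMap_congr
        (fun p hp => ih p.2 _ _ (h deps hg p.2 (snd_mem_of_mem_enumerate hp))))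

lemma buildAsciiTree_length_pos (graph : List (String × List String)) (f : Nat)
    (node pref : String) (isLast : Bool) (h : pvComplete graph f node) :
    1 ≤ (buildAsciiTree graph f node pref isLast).length := by
  cases f with
  | zero => exact h.elim
  | succ f =>
    cases hg : (PySem.Dict.ofList graph).get? node with
    | none => rw [buildAsciiTree_none graph f node pref isLast hg]; simp
    | some deps => rw [buildAsciiTree_some graph f node pref isLast hg]; simp

lemma deps_length_le (graph : List (String × List String)) {node : String}
    {deps : List String} (hg : (PySem.Dict.ofList graph).get? node = some deps) :
    deps.length ≤ (PySem.Dict.ofList graph).items.foldl (fun a p => a + p.2.length) 0 := by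
  have hmem := PySem.Dict.mem_items_of_get?_eq_some _ hg
  rw [PySem.List.foldl_add_nat]
  have : deps.length ∈ (PySem.Dict.ofList graph).items.map (fun p => p.2.length) :=
    List.mem_map.mpr ⟨(node, deps), hmem, rfl⟩
  exact le_trans (List.le_sum_of_mem this) (by omega)

lemma buildAsciiTree_length_le (graph : List (String × List String)) :
    ∀ f node pref isLast,
      (buildAsciiTree graph f node pref isLast).length ≤
        ((PySem.Dict.ofList graph).items.foldl (fun a p => a + p.2.length) 0 + 2) ^ f := by
  intro f
  induction f with
  | zero => intro node pref isLast; simp [buildAsciiTree]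
  | succ f ih =>
    intro node pref isLast
    set T := (PySem.Dict.ofList graph).items.foldl (fun a p => a + p.2.length) 0 with hT
    cases hg : (PySem.Dict.ofList graph).get? node with
    | none =>
      rw [buildAsciiTree_none graph f node pref isLast hg]
      simpa using Nat.one_le_pow (f+1) (T+2) (by omega)
    | some deps =>
      rw [buildAsciiTree_some graph f node pref isLast hg]
      simp only [List.length_cons, List.length_flatMap]
      have hsum : ((PySem.List.enumerate deps).map
          (fun p => (buildAsciiTree graph f p.2
            (pref ++ (if isLast then "    " else "│   ")) (p.1 == (deps.length : Int) - 1)).length)).sum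
          ≤ deps.length * (T+2) ^ f := by
        have := List.sum_le_card_nsmul ((PySem.List.enumerate deps).map
          (fun p => (buildAsciiTree graph f p.2
            (pref ++ (if isLast then "    " else "│   ")) (p.1 == (deps.length : Int) - 1)).length))
          ((T+2) ^ f) (by
            intro x hx
            obtain ⟨p, _, rfl⟩ := List.mem_map.mp hx
            exact ih p.2 _ _)
        simpa [PySem.List.length_enumerate, smul_eq_mul] using this
      have hd : deps.length ≤ T := deps_length_le graph hg
      have hpow : 1 ≤ (T+2) ^ f := Nat.one_le_pow f (T+2) (by omega)
      have : deps.length * (T+2) ^ f ≤ T * (T+2) ^ f := Nat.mul_le_mul_right _ hd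
      have hgoal : 1 + T * (T+2)^f ≤ (T+2)^(f+1) := by
        have : (T+2)^(f+1) = (T+2) * (T+2)^f := by ring
        rw [this]
        nlinarith
      omega

lemma loopAsciiTree_spec (graph : List (String × List String)) :
    ∀ fB (F : Nat) (stack : List (String × String × Bool)) acc,
      (∀ e ∈ stack, pvComplete graph F e.1) →
      (stack.map (fun e => (buildAsciiTree graph F e.1 e.2.1 e.2.2).length)).sum ≤ fB →
      loopAsciiTree graph fB stack acc =
        acc ++ stack.flatMap (fun e => buildAsciiTree graph F e.1 e.2.1 e.2.2) := by
  intro fB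
  induction fB with
  | zero =>
    intro F stack acc hcomp hsum
    cases stack with
    | nil => simp [loopAsciiTree]
    | cons e rest =>
      exfalso
      have h1 := buildAsciiTree_length_pos graph F e.1 e.2.1 e.2.2 (hcomp e List.mem_cons_self)
      simp only [List.map_cons, List.sum_cons] at hsum
      omega
  | succ fB ih =>
    intro F stack acc hcomp hsum
    match stack with
    | [] => simp [loopAsciiTree]
    | (node, pref, isLast) :: rest =>
      have hc : pvComplete graph F node := hcomp _ List.mem_cons_self
      cases F with
      | zero => exact hc.elim
      | succ F =>
        cases hg : (PySem.Dict.ofList graph).get? node with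
        | none =>
          have hb := buildAsciiTree_none graph F node pref isLast hg
          simp only [loopAsciiTree, hg]
          rw [ih (F+1) rest _ (fun e he => hcomp e (List.mem_cons_of_mem _ he)) (by
            simp only [List.map_cons, List.sum_cons, hb] at hsum
            simp only [List.length_cons, List.length_nil] at hsum
            omega)]
          rw [List.flatMap_cons, hb]
          simp
        | some deps =>
          have hdeps : ∀ d ∈ deps, pvComplete graph F d := hc deps hg
          have hb : buildAsciiTree graph (F+1) node pref isLast =
              (pref ++ (if isLast then "└── " else "├── ") ++ node) ::
                (PySem.List.enumerate deps).flatMap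
                  (fun p => buildAsciiTree graph (F+1) p.2
                    (pref ++ (if isLast then "    " else "│   ")) (p.1 == (deps.length : Int) - 1)) := by
            rw [buildAsciiTree_some graph F node pref isLast hg]
            exact congrArg _ (List.flatMap_congr (fun p hp =>
              (buildAsciiTree_stable graph F p.2 _ _ (hdeps p.2 (snd_mem_of_mem_enumerate hp))).symm))
          have hcomp' : ∀ e ∈ ((PySem.List.enumerate deps).map
              (fun p => (p.2, pref ++ (if isLast then "    " else "│   "),
                p.1 == (deps.length : Int) - 1)) ++ rest), pvComplete graph (F+1) e.1 := by
            intro e he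
            rcases List.mem_append.mp he with h | h
            · obtain ⟨p, hp, rfl⟩ := List.mem_map.mp h
              exact pvComplete_mono graph F p.2 (hdeps p.2 (snd_mem_of_mem_enumerate hp))
            · exact hcomp e (List.mem_cons_of_mem _ h)
          have hX : (((PySem.List.enumerate deps).map
              (fun p => (p.2, pref ++ (if isLast then "    " else "│   "),
                p.1 == (deps.length : Int) - 1))).map
                (fun e => (buildAsciiTree graph (F+1) e.1 e.2.1 e.2.2).length)).sum
              = ((PySem.List.enumerate deps).flatMap
                  (fun p => buildAsciiTree graph (F+1) p.2
                    (pref ++ (if isLast then "    " else "│   ")) (p.1 == (deps.length : Int) - 1))).length := by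
            rw [List.length_flatMap, List.map_map]
            rfl
          have hsum' : (((PySem.List.enumerate deps).map
              (fun p => (p.2, pref ++ (if isLast then "    " else "│   "),
                p.1 == (deps.length : Int) - 1)) ++ rest).map
                (fun e => (buildAsciiTree graph (F+1) e.1 e.2.1 e.2.2).length)).sum ≤ fB := by
            simp only [List.map_cons, List.sum_cons, hb, List.length_cons] at hsum
            rw [List.map_append, List.sum_append, hX]
            omega
          have hflat : ((PySem.List.enumerate deps).map
              (fun p => (p.2, pref ++ (if isLast then "    " else "│   "),
                p.1 == (deps.length : Int) - 1))).flatMap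
                (fun e => buildAsciiTree graph (F+1) e.1 e.2.1 e.2.2)
              = (PySem.List.enumerate deps).flatMap
                  (fun p => buildAsciiTree graph (F+1) p.2
                    (pref ++ (if isLast then "    " else "│   ")) (p.1 == (deps.length : Int) - 1)) := by
            rw [List.flatMap_map]
          simp only [loopAsciiTree, hg]
          rw [ih (F+1) _ _ hcomp' hsum']
          rw [List.flatMap_append, hflat, List.flatMap_cons, hb]
          simp

-- ===== VERDICT (by name: the statement is the Claim_ definition above) =====
theorem generate_ascii_tree_spec : Claim_equal_generate_ascii_tree := by
  intro graph start_node _ hpre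
  unfold Spec_generate_ascii_tree generate_ascii_tree generate_ascii_tree_alt
  have hc : pvComplete graph (graph.length + 1) start_node :=
    pre_complete graph (graph.length + 1) start_node hpre
  rw [loopAsciiTree_spec graph (pvFuelB graph) (graph.length + 1) [(start_node, "", true)] []
      (by intro e he; simp only [List.mem_singleton] at he; subst he; exact hc)
      (by
        simp only [List.map_cons, List.map_nil, List.sum_cons, List.sum_nil]
        have := buildAsciiTree_length_le graph (graph.length + 1) start_node "" true
        simpa [pvFuelB] using this)]
  simp
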